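-- pv_equiv track=rewrite | github.com/jannajchan/python | forMyKnowledge/StringIndexingAndSearching.py | mask_second_occurrence
-- ===== SOURCE A (Python) =====
-- def mask_second_occurrence(s: str, target: str) -> str:
--     if not target:
--         return s
--     i = 0
--     count = 0
--     result = ""
--     while i < len(s):
--         if s[i:i+len(target)].lower() == target.lower():
--             count += 1
--             if count == 2:
--                 result += "*"
--             else:
--                 result += s[i:i+len(target)]
--             i += len(target)
--         else:
--             result += s[i]
--             i += 1
--     return result
-- ===== SOURCE B (Python) =====
-- def mask_second_occurrence(s: str, target: str) -> str:
--     if not target: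
--         return s
--     L = len(target)
--     tl = target.lower()
--
--     def find(i):
--         while i < len(s):
--             if s[i:i+L].lower() == tl:
--                 return i
--             i += 1
--         return None
--
--     j1 = find(0)
--     if j1 is None:
--         return s
--     j2 = find(j1 + L)
--     if j2 is None:
--         return s
--     return s[:j2] + "*" + s[j2+L:]
-- ===== Notes on version B (the rewrite author's own statement) =====
-- stated objective: simpler
-- what changed: B no longer builds the output character by character with a count: it locates the first two case-insensitive match starts with a find helper (same slice-wise lowered comparison) and returns s unchanged or the single slice s[:j2] + '*' + s[j2+len(target):].
import Mathlib
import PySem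

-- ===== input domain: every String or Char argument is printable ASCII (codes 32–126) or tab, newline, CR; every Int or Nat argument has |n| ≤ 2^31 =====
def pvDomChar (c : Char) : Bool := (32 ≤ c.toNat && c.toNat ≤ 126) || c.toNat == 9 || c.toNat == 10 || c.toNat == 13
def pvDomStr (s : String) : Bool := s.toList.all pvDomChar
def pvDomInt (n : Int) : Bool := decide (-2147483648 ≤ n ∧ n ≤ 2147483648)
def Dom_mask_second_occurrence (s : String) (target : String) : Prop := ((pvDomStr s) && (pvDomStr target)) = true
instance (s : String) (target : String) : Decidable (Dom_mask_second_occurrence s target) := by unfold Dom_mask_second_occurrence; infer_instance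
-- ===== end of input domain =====

-- B locates the first two case-insensitive match starts with the same scan and rewrites s in one
-- slice 's[:j2] + "*" + s[j2+len:]' instead of rebuilding the output character by character (objective: simpler).

-- ===== PORT A =====
-- A's while-loop: i, count and the accumulated result string, step for step.
def maskLoopA (s t : List Char) (ht : t ≠ []) (i : Nat) (count : Nat) (res : List Char) : List Char :=
  if h : i < s.length then
    if PySem.Chars.lower ((s.drop i).take t.length) = PySem.Chars.lower t then
      -- count += 1; result += "*" if the new count is 2 else the matched slice; i += len(target)
      maskLoopA s t ht (i + t.length) (count + 1)
        (if count + 1 = 2 then res ++ ['*'] else res ++ (s.drop i).take t.length)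
    else
      maskLoopA s t ht (i + 1) count (res ++ [s[i]])
  else res
termination_by s.length - i
decreasing_by
  · have : 0 < t.length := List.length_pos_of_ne_nil ht
    omega
  · omega

def mask_second_occurrence (s : String) (target : String) : String :=
  if ht : target.toList = [] then s
  else String.ofList (maskLoopA s.toList target.toList ht 0 0 [])

-- ===== PORT B =====
-- B's find(i): first index j ≥ i where s[j:j+len(t)].lower() == t.lower(), scanning by 1.
def findFromB (s t : List Char) (i : Nat) : Option Nat :=
  if i < s.length then
    if PySem.Chars.lower ((s.drop i).take t.length) = PySem.Chars.lower t then some i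
    else findFromB s t (i + 1)
  else none
termination_by s.length - i

def mask_second_occurrence_alt (s : String) (target : String) : String :=
  if target.toList = [] then s
  else
    match findFromB s.toList target.toList 0 with
    | none => s
    | some j1 =>
      match findFromB s.toList target.toList (j1 + target.toList.length) with
      | none => s
      | some j2 =>
        String.ofList (s.toList.take j2 ++ '*' :: s.toList.drop (j2 + target.toList.length))

-- ===== PRECONDITION & SPEC =====
def Spec_mask_second_occurrence (s : String) (target : String) (out : String) : Prop := out = mask_second_occurrence_alt s target
instance (s : String) (target : String) (out : String) : Decidable (Spec_mask_second_occurrence s target out) := by unfold Spec_mask_second_occurrence; infer_instance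

-- ===== CLAIM (what is proved, stated in full; the proofs are below) =====
def Claim_equal_mask_second_occurrence : Prop := ∀ (s : String) (target : String), Dom_mask_second_occurrence s target → Spec_mask_second_occurrence s target (mask_second_occurrence s target)

-- ===== LEMMAS AND PROOFS =====

theorem findFromB_le (s t : List Char) (i : Nat) {j : Nat} (h : findFromB s t i = some j) : i ≤ j := by
  induction i using findFromB.induct s t with
  | case1 i hi hm => rw [findFromB, if_pos hi, if_pos hm] at h; simp at h; omega
  | case2 i hi hm ih =>
      rw [findFromB, if_pos hi, if_neg hm] at h
      have := ih h; omega
  | case3 i hi => rw [findFromB, if_neg hi] at h; simp at h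

-- After the second match (count ≥ 2) A just copies the rest of s.
theorem maskLoopA_ge2 (s t : List Char) (ht : t ≠ []) (i : Nat) (count : Nat) (res : List Char)
    (hc : 2 ≤ count) : maskLoopA s t ht i count res = res ++ s.drop i := by
  induction i, count, res using maskLoopA.induct s t ht with
  | case1 i count res hi hm ih =>
      rw [dif_neg (by omega : ¬ (count + 1 = 2))] at ih
      rw [maskLoopA, dif_pos hi, if_pos hm, if_neg (by omega), ih (by omega)]
      rw [List.append_assoc, ← List.drop_drop, List.take_append_drop]
  | case2 i count res hi hm ih =>
      rw [maskLoopA, dif_pos hi, if_neg hm, ih hc]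
      rw [List.append_assoc, List.singleton_append, ← List.drop_eq_getElem_cons hi]
  | case3 i count res hi =>
      rw [maskLoopA, dif_neg hi]
      rw [List.drop_of_length_le (by omega), List.append_nil]

-- With one match already seen, A copies up to the next match and masks it.
theorem maskLoopA_one (s t : List Char) (ht : t ≠ []) (i : Nat) (res : List Char) :
    maskLoopA s t ht i 1 res =
      match findFromB s t i with
      | none => res ++ s.drop i
      | some j => res ++ (s.drop i).take (j - i) ++ '*' :: s.drop (j + t.length) := by
  induction i using findFromB.induct s t generalizing res with
  | case1 i hi hm =>
      rw [maskLoopA, dif_pos hi, if_pos hm, if_pos rfl, maskLoopA_ge2 s t ht _ _ _ (by omega)]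
      rw [findFromB, if_pos hi, if_pos hm]
      simp
  | case2 i hi hm ih =>
      have hstep : findFromB s t i = findFromB s t (i + 1) := by
        conv_lhs => rw [findFromB]
        rw [if_pos hi, if_neg hm]
      rw [maskLoopA, dif_pos hi, if_neg hm, ih, hstep]
      cases hf : findFromB s t (i + 1) with
      | none => simp [← List.drop_eq_getElem_cons hi]
      | some j =>
          have hij : i + 1 ≤ j := findFromB_le s t (i + 1) hf
          have h1 : (s.drop i).take (j - i) = s[i] :: (s.drop (i + 1)).take (j - (i + 1)) := by
            rw [List.drop_eq_getElem_cons hi, show j - i = (j - (i + 1)) + 1 by omega,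
              List.take_succ_cons]
          simp [h1]
  | case3 i hi =>
      rw [maskLoopA, dif_neg hi, findFromB, if_neg hi,
        List.drop_of_length_le (by omega), List.append_nil]

-- With no match seen yet, A copies up to the first match, copies it, and continues with count 1.
theorem maskLoopA_zero (s t : List Char) (ht : t ≠ []) (i : Nat) (res : List Char) :
    maskLoopA s t ht i 0 res =
      match findFromB s t i with
      | none => res ++ s.drop i
      | some j =>
          maskLoopA s t ht (j + t.length) 1
            (res ++ (s.drop i).take (j - i) ++ (s.drop j).take t.length) := by
  induction i using findFromB.induct s t generalizing res with
  | case1 i hi hm =>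
      rw [maskLoopA, dif_pos hi, if_pos hm, if_neg (by omega), findFromB, if_pos hi, if_pos hm]
      simp
  | case2 i hi hm ih =>
      have hstep : findFromB s t i = findFromB s t (i + 1) := by
        conv_lhs => rw [findFromB]
        rw [if_pos hi, if_neg hm]
      rw [maskLoopA, dif_pos hi, if_neg hm, ih, hstep]
      cases hf : findFromB s t (i + 1) with
      | none => simp [← List.drop_eq_getElem_cons hi]
      | some j =>
          have hij : i + 1 ≤ j := findFromB_le s t (i + 1) hf
          have h1 : (s.drop i).take (j - i) = s[i] :: (s.drop (i + 1)).take (j - (i + 1)) := by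
            rw [List.drop_eq_getElem_cons hi, show j - i = (j - (i + 1)) + 1 by omega,
              List.take_succ_cons]
          simp [h1]
  | case3 i hi =>
      rw [maskLoopA, dif_neg hi, findFromB, if_neg hi,
        List.drop_of_length_le (by omega), List.append_nil]

-- ===== VERDICT (by name: the statement is the Claim_ definition above) =====
theorem mask_second_occurrence_spec : Claim_equal_mask_second_occurrence := by
  intro s target _
  unfold Spec_mask_second_occurrence mask_second_occurrence mask_second_occurrence_alt
  by_cases ht : target.toList = []
  · rw [dif_pos ht, if_pos ht]
  · rw [dif_neg ht, if_neg ht, maskLoopA_zero]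
    cases h1 : findFromB s.toList target.toList 0 with
    | none => simp
    | some j1 =>
      dsimp only
      rw [maskLoopA_one]
      cases h2 : findFromB s.toList target.toList (j1 + target.toList.length) with
      | none =>
        dsimp only
        simp only [List.nil_append, List.drop_zero, Nat.sub_zero, List.append_assoc]
        rw [← List.drop_drop, List.take_append_drop, List.take_append_drop]
        simp
      | some j2 =>
        dsimp only
        have hij : j1 + target.toList.length ≤ j2 :=
          findFromB_le _ _ _ h2
        congr 1
        rw [show s.toList.take j2
            = s.toList.take (j1 + target.toList.length)
              ++ (s.toList.drop (j1 + target.toList.length)).take (j2 - (j1 + target.toList.length))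
          from by rw [← List.take_add]; congr 1; omega]
        rw [List.take_add]
        simp
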